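-- pv_equiv track=rewrite | github.com/MasterKira07/URI-Online | src/python/iniciante/1020 - #8705795(accepted).py | converte
-- ===== SOURCE A (Python) =====
-- def converte(lista,dias):
--     valores = []
--     for i in lista:
--         valor = dias // i
--         dias %= i
--         valores.append(valor)
--     valores.append(dias)
--     return valores
-- ===== SOURCE B (Python) =====
-- def converte(lista, dias):
--     # Pass 1: chain of remainders r[0]=dias, r[k+1]=r[k] % lista[k]
--     rems = [dias]
--     for d in lista:
--         rems.append(rems[-1] % d)
--     # Pass 2: quotients of each remainder by its divisor, plus the leftover
--     return [r // d for r, d in zip(rems, lista)] + [rems[-1]]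
-- ===== Notes on version B (the rewrite author's own statement) =====
-- stated objective: alternative
-- what changed: B splits the single interleaved quotient/remainder loop into two passes: first a chain of successive remainders, then a zip that maps each (remainder, divisor) pair to its quotient, appending the chain's last element.
import Mathlib
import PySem

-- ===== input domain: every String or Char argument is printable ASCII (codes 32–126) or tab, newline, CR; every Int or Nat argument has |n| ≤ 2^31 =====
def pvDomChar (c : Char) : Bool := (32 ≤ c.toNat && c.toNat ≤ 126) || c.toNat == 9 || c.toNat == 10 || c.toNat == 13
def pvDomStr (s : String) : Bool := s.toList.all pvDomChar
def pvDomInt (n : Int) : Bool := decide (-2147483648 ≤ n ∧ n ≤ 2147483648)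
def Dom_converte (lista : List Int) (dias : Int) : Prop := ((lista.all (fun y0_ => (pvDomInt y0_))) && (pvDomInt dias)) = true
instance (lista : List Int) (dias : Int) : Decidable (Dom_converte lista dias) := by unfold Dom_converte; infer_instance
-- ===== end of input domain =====

-- B recomputes the same quotient/remainder breakdown in two passes (remainder chain, then zipped quotients) instead of A's single interleaved loop; same cost, alternative decomposition.
-- ===== PORT A =====
-- A: one loop, emitting dias // i and updating dias %= i at each step.
def converte (lista : List Int) (dias : Int) : List Int :=
  match lista with
  | [] => [dias]
  | i :: rest => PySem.Int.floordiv dias i :: converte rest (PySem.Int.mod dias i)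

-- ===== PORT B =====
-- B, pass 1: the chain of successive remainders r0 = dias, r(k+1) = rk % lista[k].
def remChain (lista : List Int) (dias : Int) : List Int :=
  match lista with
  | [] => [dias]
  | d :: rest => dias :: remChain rest (PySem.Int.mod dias d)

-- B, pass 2: quotient of each remainder by its divisor, then the leftover.
def converte_alt (lista : List Int) (dias : Int) : List Int :=
  let rems := remChain lista dias
  ((rems.zip lista).map (fun p => PySem.Int.floordiv p.1 p.2)) ++ [rems.getLastD 0]

-- ===== PRECONDITION & SPEC =====
-- Pre_ excludes lists containing 0, on which Python's '//' and '%' raise ZeroDivisionError (both A and B raise there).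
def Pre_converte (lista : List Int) (dias : Int) : Prop := (0 : Int) ∉ lista
instance (lista : List Int) (dias : Int) : Decidable (Pre_converte lista dias) := by unfold Pre_converte; infer_instance
def pvWitness_converte : List Int × Int := ([365, 30, 7], 400)
def Spec_converte (lista : List Int) (dias : Int) (out : List Int) : Prop := out = converte_alt lista dias
instance (lista : List Int) (dias : Int) (out : List Int) : Decidable (Spec_converte lista dias out) := by unfold Spec_converte; infer_instance

-- ===== CLAIM (what is proved, stated in full; the proofs are below) =====
def Claim_equal_converte : Prop := ∀ (lista : List Int) (dias : Int), Dom_converte lista dias → Pre_converte lista dias → Spec_converte lista dias (converte lista dias)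

-- ===== LEMMAS AND PROOFS =====
theorem remChain_ne_nil (l : List Int) (x : Int) : remChain l x ≠ [] := by
  cases l <;> simp [remChain]

theorem converte_eq_alt (lista : List Int) (dias : Int) : converte lista dias = converte_alt lista dias := by
  induction lista generalizing dias with
  | nil => simp [converte, converte_alt, remChain]
  | cons d rest ih =>
    rw [converte, ih (PySem.Int.mod dias d)]
    cases h : remChain rest (PySem.Int.mod dias d) with
    | nil => exact absurd h (remChain_ne_nil _ _)
    | cons r rs => simp [converte_alt, remChain, h]

-- ===== VERDICT (by name: the statement is the Claim_ definition above) =====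
theorem converte_spec : Claim_equal_converte := by
  intro lista dias _ _
  exact converte_eq_alt lista dias
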